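-- pv_equiv track=rewrite | github.com/eddmpython/dartlab | src/dartlab/engines/dart/docs/sections/tableParser.py | splitSubtables
-- ===== SOURCE A (Python) =====
-- def splitSubtables(md: str) -> list[list[str]]:
--     """구분선 기준 서브테이블 분리."""
--     tables: list[list[str]] = []
--     current: list[str] = []
--
--     for line in md.strip().split("\n"):
--         s = line.strip()
--         if not s.startswith("|"):
--             if current:
--                 tables.append(current)
--                 current = []
--             continue
--
--         cells = [c.strip() for c in s.strip("|").split("|")]
--         isSep = all(set(c.strip()) <= {"-", ":"} for c in cells if c.strip())
--
--         if isSep and current: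
--             if len(current) >= 2:
--                 prev = current[:-1]
--                 if prev:
--                     tables.append(prev)
--                 current = [current[-1], s]
--             else:
--                 current.append(s)
--         else:
--             current.append(s)
--
--     if current:
--         tables.append(current)
--     return tables
-- ===== SOURCE B (Python) =====
-- def _isSep(s: str) -> bool:
--     cells = [c.strip() for c in s.strip("|").split("|")]
--     return all(set(c) <= {"-", ":"} for c in cells if c)
--
--
-- def _blocks(lines):
--     blocks, cur = [], []
--     for raw in lines:
--         s = raw.strip()
--         if s.startswith("|"):
--             cur.append(s)
--         elif cur:
--             blocks.append(cur)
--             cur = []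
--     if cur:
--         blocks.append(cur)
--     return blocks
--
--
-- def _splitBlock(block):
--     seps = [i for i, s in enumerate(block) if _isSep(s)]
--     pieces, start = [], 0
--     for i in seps:
--         if i - start >= 2:
--             pieces.append(block[start:i - 1])
--             start = i - 1
--     pieces.append(block[start:])
--     return pieces
--
--
-- def splitSubtables(md: str) -> list[list[str]]:
--     """구분선 기준 서브테이블 분리."""
--     return [t for b in _blocks(md.strip().split("\n")) for t in _splitBlock(b)]
-- ===== Notes on version B (the rewrite author's own statement) =====
-- stated objective: alternative
-- what changed: A's single flat stateful fold over all lines is replaced by a two-stage pipeline: first group consecutive pipe-lines into blocks, then split each block independently by collecting its separator-line indices and cutting the block by index slicing.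
import Mathlib
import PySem

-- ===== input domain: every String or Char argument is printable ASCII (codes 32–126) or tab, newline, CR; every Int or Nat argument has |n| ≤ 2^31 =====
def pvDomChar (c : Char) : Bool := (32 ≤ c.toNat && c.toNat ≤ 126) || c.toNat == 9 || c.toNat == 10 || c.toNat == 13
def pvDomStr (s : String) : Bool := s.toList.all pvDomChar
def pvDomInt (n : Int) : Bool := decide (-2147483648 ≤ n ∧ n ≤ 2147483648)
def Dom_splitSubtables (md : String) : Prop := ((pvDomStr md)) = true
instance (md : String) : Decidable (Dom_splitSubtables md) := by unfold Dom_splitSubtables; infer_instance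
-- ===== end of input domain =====

-- B replaces A's single flat stateful fold by a group-into-blocks pass followed by an index-based
-- per-block splitter (objective: alternative decomposition, same cost).

-- ===== PORT A =====
-- set(c) <= {"-", ":"}  : every character of c is '-' or ':'
def pvAllDashColon (c : String) : Bool := c.toList.all (fun ch => ch == '-' || ch == ':')

-- cells = [c.strip() for c in s.strip("|").split("|")]; all(set(c.strip()) <= {"-",":"} for c in cells if c.strip())
def pvIsSepA (s : String) : Bool :=
  (((PySem.Str.split? (PySem.Str.stripChars s "|") "|").getD []).map PySem.Str.strip).all
    (fun c => (PySem.Str.strip c == "") || pvAllDashColon (PySem.Str.strip c))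

-- the body of A's for-loop, state = (tables, current)
def pvStepA (st : List (List String) × List String) (line : String) :
    List (List String) × List String :=
  let s := PySem.Str.strip line
  if !(PySem.Str.startswith s "|") then
    (if st.2 ≠ [] then (st.1 ++ [st.2], ([] : List String)) else st)
  else if pvIsSepA s && st.2 ≠ [] then
    if st.2.length ≥ 2 then
      let prev := PySem.List.slice st.2 none (some (-1))                 -- current[:-1]
      ((if prev ≠ [] then st.1 ++ [prev] else st.1),
        [(PySem.List.pyGet? st.2 (-1)).getD "", s])                      -- [current[-1], s]; in range: length ≥ 2
    else (st.1, st.2 ++ [s])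
  else (st.1, st.2 ++ [s])

def splitSubtables (md : String) : List (List String) :=
  let lines := (PySem.Str.split? (PySem.Str.strip md) "\n").getD []      -- sep "\n" ≠ "" so split? is some
  let st := lines.foldl pvStepA ([], [])
  if st.2 ≠ [] then st.1 ++ [st.2] else st.1

-- ===== PORT B =====
-- B's _isSep: cells pre-stripped once, no re-strip in the test
def pvDashColonOnly (c : String) : Bool := c.toList.all (fun ch => ch == '-' || ch == ':')

def pvIsSepB (s : String) : Bool :=
  (((PySem.Str.split? (PySem.Str.stripChars s "|") "|").getD []).map PySem.Str.strip).all
    (fun c => (c == "") || pvDashColonOnly c)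

-- _blocks: group consecutive stripped pipe-lines
def pvBlocksStep (st : List (List String) × List String) (raw : String) :
    List (List String) × List String :=
  let s := PySem.Str.strip raw
  if PySem.Str.startswith s "|" then (st.1, st.2 ++ [s])
  else if st.2 ≠ [] then (st.1 ++ [st.2], ([] : List String)) else st

def pvBlocks (lines : List String) : List (List String) :=
  let st := lines.foldl pvBlocksStep ([], [])
  if st.2 ≠ [] then st.1 ++ [st.2] else st.1

-- _splitBlock's cut loop, state = (pieces, start)
def pvCutStep (block : List String) (st : List (List String) × Int) (i : Int) :
    List (List String) × Int :=
  if i - st.2 ≥ 2 then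
    (st.1 ++ [PySem.List.slice block (some st.2) (some (i - 1))], i - 1)
  else st

def pvSplitBlock (block : List String) : List (List String) :=
  let seps := (PySem.List.enumerate block).filterMap
    (fun p => if pvIsSepB p.2 then some p.1 else none)
  let st := seps.foldl (pvCutStep block) ([], 0)
  st.1 ++ [PySem.List.slice block (some st.2) none]

def splitSubtables_alt (md : String) : List (List String) :=
  (pvBlocks ((PySem.Str.split? (PySem.Str.strip md) "\n").getD [])).flatMap pvSplitBlock

-- ===== PRECONDITION & SPEC =====
def Spec_splitSubtables (md : String) (out : List (List String)) : Prop := out = splitSubtables_alt md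
instance (md : String) (out : List (List String)) : Decidable (Spec_splitSubtables md out) := by unfold Spec_splitSubtables; infer_instance

-- ===== CLAIM (what is proved, stated in full; the proofs are below) =====
def Claim_equal_splitSubtables : Prop := ∀ (md : String), Dom_splitSubtables md → Spec_splitSubtables md (splitSubtables md)

-- ===== LEMMAS AND PROOFS =====

-- strip is idempotent (Chars level, then Str level)
lemma pv_dropWhile_prefix_self {p : Char → Bool} {a m : List Char}
    (ha : a.dropWhile p = a) (hm : m <+: a) : m.dropWhile p = m := by
  cases m with
  | nil => simp
  | cons x m' =>
    obtain ⟨t, ht⟩ := hm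
    subst ht
    rw [List.cons_append, List.dropWhile_cons] at ha
    rw [List.dropWhile_cons]
    split at ha
    · exfalso
      have hle := List.length_dropWhile_le p (m' ++ t)
      rw [ha] at hle
      simp at hle
    · simp_all

lemma pv_chars_strip_idem (l : List Char) :
    PySem.Chars.strip (PySem.Chars.strip l) = PySem.Chars.strip l := by
  simp only [PySem.Chars.strip, PySem.Chars.rstrip, PySem.Chars.lstrip]
  set p := PySem.Chars.isspace
  set a := l.dropWhile p with ha
  have hidem : a.dropWhile p = a := List.dropWhile_idempotent p l
  have hpref : ((a.reverse.dropWhile p).reverse) <+: a := by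
    have h1 : a.reverse.dropWhile p <:+ a.reverse := List.dropWhile_suffix p
    have h2 : (a.reverse.dropWhile p).reverse <+: a.reverse.reverse :=
      List.reverse_prefix.mpr (by simpa using h1)
    simpa using h2
  rw [pv_dropWhile_prefix_self hidem hpref]
  rw [List.reverse_reverse, List.dropWhile_idempotent]

lemma pv_str_strip_idem (s : String) :
    PySem.Str.strip (PySem.Str.strip s) = PySem.Str.strip s := by
  have h : (PySem.Str.strip (PySem.Str.strip s)).toList = (PySem.Str.strip s).toList := by
    simp [PySem.Str.toList_strip]
    exact pv_chars_strip_idem s.toList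
  exact String.toList_inj.mp h

-- the two separator tests agree
lemma pv_dashColon_eq (c : String) : pvDashColonOnly c = pvAllDashColon c := rfl

lemma pv_isSep_eq (s : String) : pvIsSepA s = pvIsSepB s := by
  unfold pvIsSepA pvIsSepB
  generalize ((PySem.Str.split? (PySem.Str.stripChars s "|") "|").getD []) = l
  induction l with
  | nil => rfl
  | cons x xs ih =>
    simp only [List.map_cons, List.all_cons, ih, pv_str_strip_idem, pv_dashColon_eq]

-- A's pipe-branch as a step on the already-stripped line
def pvInnerStep (st : List (List String) × List String) (s : String) :
    List (List String) × List String :=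
  if pvIsSepA s && st.2 ≠ [] then
    if st.2.length ≥ 2 then
      let prev := PySem.List.slice st.2 none (some (-1))
      ((if prev ≠ [] then st.1 ++ [prev] else st.1),
        [(PySem.List.pyGet? st.2 (-1)).getD "", s])
    else (st.1, st.2 ++ [s])
  else (st.1, st.2 ++ [s])

def pvInner (cur : List String) : List (List String) × List String :=
  cur.foldl pvInnerStep ([], [])

def pvProcess (b : List String) : List (List String) :=
  let st := pvInner b
  if st.2 ≠ [] then st.1 ++ [st.2] else st.1

-- the common final flush of both folds
def pvFinish (st : List (List String) × List String) : List (List String) :=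
  if st.2 ≠ [] then st.1 ++ [st.2] else st.1

-- recursive per-block splitter (proof-side common form)
def pvSplit' (cur : List String) : List String → List (List String)
  | [] => [cur]
  | s :: rest =>
    if pvIsSepA s && cur ≠ [] then
      if cur.length ≥ 2 then
        (PySem.List.slice cur none (some (-1))) ::
          pvSplit' [(PySem.List.pyGet? cur (-1)).getD "", s] rest
      else pvSplit' (cur ++ [s]) rest
    else pvSplit' (cur ++ [s]) rest

-- blocks, recursively
def pvBlocksRest (cur : List String) : List String → List (List String)
  | [] => if cur ≠ [] then [cur] else []
  | raw :: rest =>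
    let s := PySem.Str.strip raw
    if PySem.Str.startswith s "|" then pvBlocksRest (cur ++ [s]) rest
    else (if cur ≠ [] then [cur] else []) ++ pvBlocksRest [] rest

-- separator indices of rest, offset k
def pvSepsAux : List String → Nat → List Int
  | [], _ => []
  | s :: r, k => (if pvIsSepA s then [(k : Int)] else []) ++ pvSepsAux r (k + 1)

lemma pv_blocks_eq_rest (lines : List String) (cur : List String) (acc : List (List String)) :
    pvFinish (lines.foldl pvBlocksStep (acc, cur)) = acc ++ pvBlocksRest cur lines := by
  induction lines generalizing cur acc with
  | nil =>
    simp only [List.foldl_nil, pvBlocksRest, pvFinish]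
    split <;> simp
  | cons raw rest ih =>
    simp only [List.foldl_cons, pvBlocksRest, pvBlocksStep]
    by_cases hp : PySem.Str.startswith (PySem.Str.strip raw) "|"
    · simpa only [hp, if_pos] using ih (cur ++ [PySem.Str.strip raw]) acc
    · by_cases hc : cur = []
      · subst hc
        simp only [hp, if_neg, Bool.false_eq_true, not_false_iff, ne_eq,
          not_true_eq_false, if_false, ite_self]
        simpa using ih [] acc
      · simp only [hp, Bool.false_eq_true, if_false, ne_eq, hc, not_false_iff, if_true,
          ite_not, List.append_assoc]
        have := ih [] (acc ++ [cur])
        simp only [List.append_assoc] at this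
        simpa using this

lemma pv_blocksRest_ne (cur : List String) (lines : List String) (b : List String)
    (hb : b ∈ pvBlocksRest cur lines) : b ≠ [] := by
  induction lines generalizing cur with
  | nil =>
    simp only [pvBlocksRest] at hb
    split at hb <;> simp_all
  | cons raw rest ih =>
    simp only [pvBlocksRest] at hb
    split at hb
    · exact ih _ hb
    · rw [List.mem_append] at hb
      rcases hb with hb | hb
      · split at hb <;> simp_all
      · exact ih _ hb

lemma pv_innerStep_shift (s : String) (T P : List (List String)) (C : List String) :
    pvInnerStep (T ++ P, C) s = (T ++ (pvInnerStep (P, C) s).1, (pvInnerStep (P, C) s).2) := by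
  unfold pvInnerStep
  split_ifs <;> simp_all <;> split <;> simp

lemma pv_innerStep_snd_ne (st : List (List String) × List String) (s : String) :
    (pvInnerStep st s).2 ≠ [] := by
  unfold pvInnerStep
  split_ifs <;> simp

lemma pv_inner_ne (rest : List String) (P : List (List String)) (C : List String)
    (h : C ≠ [] ∨ rest ≠ []) : (rest.foldl pvInnerStep (P, C)).2 ≠ [] := by
  induction rest generalizing P C with
  | nil => simpa using h
  | cons s r ih =>
    rw [List.foldl_cons]
    rcases r with _ | _
    · simpa using pv_innerStep_snd_ne (P, C) s
    · have := ih (pvInnerStep (P, C) s).1 (pvInnerStep (P, C) s).2 (Or.inl (pv_innerStep_snd_ne _ s))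
      simpa using this

lemma pv_stepA_pipe (st : List (List String) × List String) (line : String)
    (hp : PySem.Str.startswith (PySem.Str.strip line) "|" = true) :
    pvStepA st line = pvInnerStep st (PySem.Str.strip line) := by
  unfold pvStepA pvInnerStep
  simp only [hp, Bool.not_true, Bool.false_eq_true, if_false]

lemma pv_stepA_nonpipe (st : List (List String) × List String) (line : String)
    (hp : ¬ PySem.Str.startswith (PySem.Str.strip line) "|" = true) :
    pvStepA st line = if st.2 ≠ [] then (st.1 ++ [st.2], ([] : List String)) else st := by
  unfold pvStepA
  simp only [Bool.not_eq_true] at hp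
  simp only [hp, Bool.not_false, if_true]

lemma pv_inner_append (cur : List String) (s : String) :
    pvInner (cur ++ [s]) = pvInnerStep (pvInner cur) s := by
  unfold pvInner
  rw [List.foldl_append, List.foldl_cons, List.foldl_nil]

lemma pv_afold_eq_blocks (lines : List String) (T : List (List String)) (cur : List String) :
    pvFinish (lines.foldl pvStepA (T ++ (pvInner cur).1, (pvInner cur).2))
      = T ++ (pvBlocksRest cur lines).flatMap pvProcess := by
  induction lines generalizing T cur with
  | nil =>
    rw [List.foldl_nil]
    simp only [pvBlocksRest]
    have h0 : pvInner [] = ([], []) := rfl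
    by_cases hc : cur = []
    · subst hc
      rw [h0]
      simp [pvFinish]
    · have hC : (pvInner cur).2 ≠ [] := pv_inner_ne cur [] [] (Or.inr hc)
      simp only [pvFinish, hc, not_false_iff, if_true, ne_eq, hC, List.flatMap_cons,
        List.flatMap_nil, List.append_nil, pvProcess, List.append_assoc]
  | cons raw rest ih =>
    rw [List.foldl_cons]
    simp only [pvBlocksRest]
    by_cases hp : PySem.Str.startswith (PySem.Str.strip raw) "|"
    · rw [pv_stepA_pipe _ _ hp, pv_innerStep_shift, ← pv_inner_append]
      simp only [hp, if_pos]
      exact ih _ _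
    · rw [pv_stepA_nonpipe _ _ hp]
      have h0 : pvInner [] = ([], []) := rfl
      by_cases hc : cur = []
      · subst hc
        rw [h0]
        simp only [List.append_nil, ne_eq, not_true_eq_false, if_false]
        have := ih T []
        rw [h0] at this
        simp only [List.append_nil] at this
        rw [this]
        simp only [hp, Bool.false_eq_true, if_false, ne_eq, not_true_eq_false,
          List.nil_append]
      · have hC : (pvInner cur).2 ≠ [] := pv_inner_ne cur [] [] (Or.inr hc)
        simp only [ne_eq, hC, not_false_iff, if_true]
        have := ih (T ++ (pvInner cur).1 ++ [(pvInner cur).2]) []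
        rw [h0] at this
        simp only [List.append_nil] at this
        rw [this]
        simp only [hp, Bool.false_eq_true, if_false, hc, not_false_iff, if_true,
          List.flatMap_cons, List.flatMap_append, List.append_assoc]
        simp [pvProcess, hC]

lemma pv_process_eq_split' (rest : List String) (P : List (List String)) (C : List String)
    (h : C ≠ [] ∨ rest ≠ []) :
    pvFinish (rest.foldl pvInnerStep (P, C)) = P ++ pvSplit' C rest := by
  induction rest generalizing P C with
  | nil =>
    rcases h with h | h
    · simp [pvFinish, h, pvSplit']
    · exact absurd rfl h
  | cons s r ih =>
    rw [List.foldl_cons]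
    have hsplit : pvSplit' C (s :: r)
        = if pvIsSepA s && C ≠ [] then
            if C.length ≥ 2 then
              (PySem.List.slice C none (some (-1))) ::
                pvSplit' [(PySem.List.pyGet? C (-1)).getD "", s] r
            else pvSplit' (C ++ [s]) r
          else pvSplit' (C ++ [s]) r := rfl
    by_cases hsep : (pvIsSepA s && decide (C ≠ [])) = true
    · by_cases hlen : C.length ≥ 2
      · have hprev : PySem.List.slice C none (some (-1)) ≠ [] := by
          rw [PySem.List.slice_to_neg_one]
          intro hcontra
          have h1 := congrArg List.length hcontra
          rw [List.length_dropLast] at h1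
          simp at h1
          omega
        have hstep : pvInnerStep (P, C) s
            = (P ++ [PySem.List.slice C none (some (-1))],
               [(PySem.List.pyGet? C (-1)).getD "", s]) := by
          unfold pvInnerStep
          simp only [hsep, if_true, hlen, if_pos, hprev, ne_eq, not_false_iff]
        rw [hstep, ih _ _ (Or.inl (by simp))]
        rw [hsplit]
        simp only [hsep, hlen, if_pos, if_true]
        simp
      · have hstep : pvInnerStep (P, C) s = (P, C ++ [s]) := by
          unfold pvInnerStep
          simp only [hsep, if_true, hlen, if_false, if_neg, not_false_iff]
        rw [hstep, ih _ _ (Or.inl (by simp))]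
        rw [hsplit]
        simp only [hsep, hlen, if_pos, if_neg, not_false_iff, if_true, if_false]
    · have hstep : pvInnerStep (P, C) s = (P, C ++ [s]) := by
        unfold pvInnerStep
        simp only [hsep, Bool.false_eq_true, if_false]
      rw [hstep, ih _ _ (Or.inl (by simp))]
      rw [hsplit]
      simp only [hsep, Bool.false_eq_true, if_false]

lemma pv_seps_eq (b : List String) (k : Nat) :
    (PySem.List.enumerate b (k : Int)).filterMap
      (fun p => if pvIsSepB p.2 then some p.1 else none) = pvSepsAux b k := by
  induction b generalizing k with
  | nil => simp [PySem.List.enumerate_nil, pvSepsAux]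
  | cons x xs ih =>
    rw [PySem.List.enumerate_cons, List.filterMap_cons]
    have hcast : (k : Int) + 1 = ((k + 1 : Nat) : Int) := by push_cast; ring
    rw [hcast, ih (k + 1)]
    simp only [pvSepsAux, ← pv_isSep_eq x]
    by_cases hx : pvIsSepA x <;> simp [hx]

lemma pv_cutfold_shift (b : List String) (seps : List Int) (Q R : List (List String)) (t : Int) :
    seps.foldl (pvCutStep b) (Q ++ R, t)
      = (Q ++ (seps.foldl (pvCutStep b) (R, t)).1, (seps.foldl (pvCutStep b) (R, t)).2) := by
  induction seps generalizing R t with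
  | nil => simp
  | cons i is ih =>
    rw [List.foldl_cons, List.foldl_cons]
    unfold pvCutStep
    by_cases hi : i - t ≥ 2
    · simp only [hi, if_pos, if_true]
      rw [List.append_assoc]
      exact ih _ _
    · simp only [hi, if_neg, not_false_iff, if_false]
      exact ih _ _

set_option maxHeartbeats 2000000 in
lemma pv_split'_eq_cuts (rest : List String) (b : List String) (k start : Nat)
    (hrest : rest = b.drop k) (hsk : start ≤ k) (hk : k ≤ b.length) :
    pvSplit' ((b.drop start).take (k - start)) rest
      = ((pvSepsAux rest k).foldl (pvCutStep b) ([], (start : Int))).1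
          ++ [PySem.List.slice b
                (some ((pvSepsAux rest k).foldl (pvCutStep b) ([], (start : Int))).2) none] := by
  induction rest generalizing k start with
  | nil =>
    have hlen : b.length ≤ k := by
      have h1 := congrArg List.length hrest
      simp only [List.length_nil, List.length_drop] at h1
      omega
    have hcur : (b.drop start).take (k - start) = b.drop start := by
      apply List.take_of_length_le
      simp only [List.length_drop]
      omega
    rw [hcur]
    simp only [pvSepsAux, List.foldl_nil, pvSplit']
    rw [PySem.List.slice_from_natCast]
    simp
  | cons s r ih =>
    have hklen : k < b.length := by
      by_contra hcon
      push_neg at hcon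
      rw [List.drop_eq_nil_of_le hcon] at hrest
      exact List.cons_ne_nil s r hrest
    have hdrop : b[k] :: b.drop (k + 1) = b.drop k := List.getElem_cons_drop hklen
    rw [← hdrop] at hrest
    obtain ⟨hs, hr⟩ : s = b[k] ∧ r = b.drop (k + 1) := by
      injection hrest with h1 h2; exact ⟨h1, h2⟩
    have hcurlen : ((b.drop start).take (k - start)).length = k - start := by
      simp only [List.length_take, List.length_drop]
      omega
    have hsplit : pvSplit' ((b.drop start).take (k - start)) (s :: r)
        = if pvIsSepA s && (b.drop start).take (k - start) ≠ [] then
            if ((b.drop start).take (k - start)).length ≥ 2 then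
              (PySem.List.slice ((b.drop start).take (k - start)) none (some (-1))) ::
                pvSplit' [(PySem.List.pyGet? ((b.drop start).take (k - start)) (-1)).getD "", s] r
            else pvSplit' ((b.drop start).take (k - start) ++ [s]) r
          else pvSplit' ((b.drop start).take (k - start) ++ [s]) r := rfl
    have hext : (b.drop start).take (k - start) ++ [s] = (b.drop start).take ((k + 1) - start) := by
      have h1 : (b.drop start)[k - start]? = some b[k] := by
        rw [List.getElem?_drop]
        have : start + (k - start) = k := by omega
        rw [this]
        exact List.getElem?_eq_getElem hklen
      have h2 : (k + 1) - start = (k - start) + 1 := by omega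
      rw [h2, List.take_add_one, h1, hs]
      rfl
    by_cases hsep : pvIsSepA s
    · simp only [pvSepsAux, hsep, if_pos, if_true, List.singleton_append, List.foldl_cons]
      by_cases hcut : k - start ≥ 2
      · -- a genuine cut before line k
        have hcuti : ((k : Int) - (start : Int) ≥ 2) := by
          push_cast
          omega
        have hk1 : (k : Int) - 1 = ((k - 1 : Nat) : Int) := by
          push_cast [Nat.cast_sub (by omega : 1 ≤ k)]
          ring
        have hcstep : pvCutStep b ([], (start : Int)) (k : Int)
            = ([PySem.List.slice b (some (start : Int)) (some ((k : Int) - 1))], (k : Int) - 1) := by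
          unfold pvCutStep
          simp only [hcuti, if_pos, if_true]
          simp
        rw [hsplit]
        have hne : (b.drop start).take (k - start) ≠ [] := by
          intro hcontra
          rw [hcontra] at hcurlen
          simp at hcurlen
          omega
        simp only [hsep, hne, ne_eq, not_false_iff, Bool.and_true, decide_true, if_true,
          hcurlen, hcut, if_pos]
        have hprev : PySem.List.slice ((b.drop start).take (k - start)) none (some (-1))
            = (b.drop start).take ((k - 1) - start) := by
          rw [PySem.List.slice_to_neg_one, List.dropLast_eq_take, List.length_take,
            List.take_take, List.length_drop]
          congr 1
          omega
        have hlast : (PySem.List.pyGet? ((b.drop start).take (k - start)) (-1)).getD ""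
            = b[k - 1] := by
          rw [PySem.List.pyGet?_neg_one, List.getLast?_eq_getElem?, hcurlen]
          have h1 : ((b.drop start).take (k - start))[k - start - 1]?
              = (b.drop start)[k - start - 1]? := by
            apply List.getElem?_take_of_lt
            omega
          rw [h1, List.getElem?_drop]
          have h2 : start + (k - start - 1) = k - 1 := by omega
          rw [h2, List.getElem?_eq_getElem (by omega)]
          rfl
        have hpair : [(b[k - 1] : String), s] = (b.drop (k - 1)).take ((k + 1) - (k - 1)) := by
          have h2 : (k + 1) - (k - 1) = 2 := by omega
          have h3 : b[k - 1] :: b.drop k = b.drop (k - 1) := by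
            have := List.getElem_cons_drop (as := b) (i := k - 1) (by omega : k - 1 < b.length)
            have h4 : k - 1 + 1 = k := by omega
            rwa [h4] at this
          rw [h2, ← h3, ← hdrop, hs]
          rfl
        rw [hprev, hlast, hpair, ih (k + 1) (k - 1) hr (by omega) (by omega), hcstep]
        have hshift := pv_cutfold_shift b (pvSepsAux r (k + 1))
          [PySem.List.slice b (some (start : Int)) (some ((k : Int) - 1))] [] ((k : Int) - 1)
        simp only [List.append_nil] at hshift
        rw [hshift]
        simp only [List.nil_append, hk1]
        have hpiece : PySem.List.slice b (some (start : Int)) (some (((k - 1 : Nat)) : Int))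
            = (b.drop start).take ((k - 1) - start) := by
          rw [PySem.List.slice_natCast]
        rw [hpiece]
        simp
      · -- separator too early: no cut, just append
        have hcuti : ¬ ((k : Int) - (start : Int) ≥ 2) := by
          push_cast
          omega
        have hcstep : pvCutStep b ([], (start : Int)) (k : Int) = ([], (start : Int)) := by
          unfold pvCutStep
          simp only [hcuti, if_neg, not_false_iff, if_false]
        rw [hsplit]
        have hno : ¬ (((b.drop start).take (k - start)).length ≥ 2) := by
          rw [hcurlen]
          omega
        simp only [hno, if_neg, not_false_iff, if_false, ite_self]
        rw [hext, ih (k + 1) start hr (by omega) (by omega), hcstep]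
    · simp only [pvSepsAux, hsep, Bool.false_eq_true, if_false, List.nil_append]
      rw [hsplit]
      simp only [hsep, Bool.false_and, Bool.false_eq_true, if_false]
      rw [hext, ih (k + 1) start hr (by omega) (by omega)]

lemma pv_splitBlock_eq_split' (b : List String) : pvSplitBlock b = pvSplit' [] b := by
  have h := pv_split'_eq_cuts b b 0 0 (by simp) (Nat.le_refl 0) (Nat.zero_le _)
  simp only [List.drop_zero, List.take_zero, Nat.sub_zero, Nat.cast_zero] at h
  unfold pvSplitBlock
  have hseps := pv_seps_eq b 0
  simp only [Nat.cast_zero] at hseps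
  rw [hseps]
  exact h.symm

-- ===== VERDICT (by name: the statement is the Claim_ definition above) =====
theorem splitSubtables_spec : Claim_equal_splitSubtables := by
  intro md _
  unfold Spec_splitSubtables
  have hA : splitSubtables md
      = pvFinish ((((PySem.Str.split? (PySem.Str.strip md) "\n").getD [])).foldl
          pvStepA ([], [])) := rfl
  have hB : splitSubtables_alt md
      = (pvFinish ((((PySem.Str.split? (PySem.Str.strip md) "\n").getD [])).foldl
          pvBlocksStep ([], []))).flatMap pvSplitBlock := rfl
  rw [hA, hB, pv_blocks_eq_rest _ [] []]
  have h0 : pvInner [] = ([], []) := rfl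
  have h1 := pv_afold_eq_blocks ((PySem.Str.split? (PySem.Str.strip md) "\n").getD []) [] []
  rw [h0] at h1
  simp only [List.append_nil, List.nil_append] at h1 ⊢
  rw [h1]
  refine List.flatMap_congr (fun b hb => ?_)
  have hne : b ≠ [] := pv_blocksRest_ne [] _ b hb
  calc pvProcess b = pvFinish (b.foldl pvInnerStep ([], [])) := rfl
    _ = [] ++ pvSplit' [] b := pv_process_eq_split' b [] [] (Or.inr hne)
    _ = pvSplitBlock b := by rw [pv_splitBlock_eq_split']; simp
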